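-- pv_equiv track=rewrite | github.com/whharris917/phoenix | test.py | find_json_block
-- ===== SOURCE A (Python) =====
-- def find_json_block(text):
--     """
--     Finds the JSON block in a string by working backwards from the end
--     and balancing curly braces.
--     """
--     end_index = text.rfind('}')
--     if end_index == -1:
--         return None, None # No JSON object found
--
--     brace_count = 1
--     start_index = -1
--
--     for i in range(end_index - 1, -1, -1):
--         char = text[i]
--         if char == '}':
--             brace_count += 1
--         elif char == '{':
--             brace_count -= 1
--
--         if brace_count == 0:
--             start_index = i
--             break
--
--     if start_index == -1:
--         return None, None # Malformed or incomplete JSON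
--
--     return start_index, end_index + 1
-- ===== SOURCE B (Python) =====
-- def find_json_block(text):
--     end_index = text.rfind('}')
--     if end_index == -1:
--         return None, None  # No JSON object found
--     stack = []
--     for i in range(end_index):
--         ch = text[i]
--         if ch == '{':
--             stack.append(i)
--         elif ch == '}':
--             if stack:
--                 stack.pop()
--     if not stack:
--         return None, None  # Malformed or incomplete JSON
--     return stack[-1], end_index + 1
-- ===== Notes on version B (the rewrite author's own statement) =====
-- stated objective: alternative
-- what changed: Replaces the backward depth-counter scan from the last closing brace with a forward pass maintaining a stack of positions of unmatched opening braces; the stack top is the matching start.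
import Mathlib
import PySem

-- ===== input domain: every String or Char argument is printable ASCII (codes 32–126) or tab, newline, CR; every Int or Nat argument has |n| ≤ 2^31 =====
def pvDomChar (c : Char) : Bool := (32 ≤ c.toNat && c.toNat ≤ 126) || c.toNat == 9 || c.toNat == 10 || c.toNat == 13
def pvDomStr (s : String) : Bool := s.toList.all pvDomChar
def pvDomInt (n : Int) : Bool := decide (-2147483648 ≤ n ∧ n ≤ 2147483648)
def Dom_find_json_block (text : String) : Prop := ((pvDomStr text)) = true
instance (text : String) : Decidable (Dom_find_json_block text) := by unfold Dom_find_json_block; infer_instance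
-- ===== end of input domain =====

-- B replaces A's backward depth-counter scan with a forward stack of positions of unmatched opening braces (alternative algorithm, same cost).

-- ===== PORT A =====
-- the backward loop `for i in range(end_index-1, -1, -1)` with its break:
-- recursion on j, processing index j-1 first; returns start_index (-1 if the loop never breaks).
-- `text[i]` is in range for every visited i, so `getD i ' '` is exact here.
def pvLoopA (cs : List Char) : Nat → Int → Int
  | 0, _ => -1
  | j + 1, brace_count =>
    let char := cs.getD j ' '
    let brace_count' :=
      if char = '}' then brace_count + 1
      else if char = '{' then brace_count - 1
      else brace_count
    if brace_count' = 0 then (j : Int) else pvLoopA cs j brace_count'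

def find_json_block (text : String) : Option Int × Option Int :=
  let end_index := PySem.Str.rfind text "}"
  if end_index = -1 then (none, none)
  else
    let start_index := pvLoopA text.toList end_index.toNat 1
    if start_index = -1 then (none, none)
    else (some start_index, some (end_index + 1))

-- ===== PORT B =====
-- forward pass over range(end_index): push the position of each opening brace, pop on a closing one if non-empty.
def pvStackB (cs : List Char) (n : Nat) : List Int :=
  (List.range n).foldl
    (fun stack i =>
      let ch := cs.getD i ' '
      if ch = '{' then stack ++ [(i : Int)]
      else if ch = '}' then (if stack = [] then stack else stack.dropLast)
      else stack) []

def find_json_block_alt (text : String) : Option Int × Option Int :=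
  let end_index := PySem.Str.rfind text "}"
  if end_index = -1 then (none, none)
  else
    let stack := pvStackB text.toList end_index.toNat
    match stack.getLast? with
    | none => (none, none)                       -- `if not stack: return None, None`
    | some s => (some s, some (end_index + 1))   -- `return stack[-1], end_index + 1`

-- ===== PRECONDITION & SPEC =====
def Spec_find_json_block (text : String) (out : Option Int × Option Int) : Prop := out = find_json_block_alt text
instance (text : String) (out : Option Int × Option Int) : Decidable (Spec_find_json_block text out) := by unfold Spec_find_json_block; infer_instance

-- ===== CLAIM (what is proved, stated in full; the proofs are below) =====
def Claim_equal_find_json_block : Prop := ∀ (text : String), Dom_find_json_block text → Spec_find_json_block text (find_json_block text)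

-- ===== LEMMAS AND PROOFS =====

theorem pvStackB_succ (cs : List Char) (n : Nat) :
    pvStackB cs (n + 1) =
      (let ch := cs.getD n ' '
       if ch = '{' then pvStackB cs n ++ [(n : Int)]
       else if ch = '}' then (if pvStackB cs n = [] then pvStackB cs n else (pvStackB cs n).dropLast)
       else pvStackB cs n) := by
  simp [pvStackB, List.range_succ]

theorem pvStackB_nonneg (cs : List Char) (n : Nat) :
    ∀ x ∈ pvStackB cs n, 0 ≤ x := by
  induction n with
  | zero => simp [pvStackB]
  | succ n ih =>
    rw [pvStackB_succ]
    intro x hx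
    simp only at hx
    split_ifs at hx with h1 h2 h3
    · rcases List.mem_append.1 hx with h | h
      · exact ih x h
      · simp at h; omega
    · exact ih x hx
    · exact ih x ((pvStackB cs n).dropLast_sublist.mem hx)
    · exact ih x hx

-- pop's reverse is the tail of the reverse, uniformly in the empty case
theorem pop_reverse (S : List Int) :
    (if S = [] then S else S.dropLast).reverse = S.reverse.tail := by
  induction S using List.reverseRecOn with
  | nil => simp
  | append_singleton T a ih => simp

-- main invariant: A's backward counter scan reads the k-th element from the top of B's stack
theorem pvLoopA_eq_stack (cs : List Char) :
    ∀ (n : Nat) (k : Nat),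
      pvLoopA cs n ((k : Int) + 1) = ((pvStackB cs n).reverse[k]?).getD (-1) := by
  intro n
  induction n with
  | zero => intro k; simp [pvLoopA, pvStackB]
  | succ n ih =>
    intro k
    rw [pvStackB_succ]
    simp only [pvLoopA]
    by_cases hc1 : cs.getD n ' ' = '}'
    · -- closing brace: counter goes up, stack pops
      rw [if_pos hc1]
      have hne : ((k : Int) + 1) + 1 ≠ 0 := by omega
      rw [if_neg hne]
      have hcast : ((k : Int) + 1) + 1 = ((k + 1 : Nat) : Int) + 1 := by push_cast; ring
      rw [hcast, ih (k + 1)]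
      have h2 : cs.getD n ' ' ≠ '{' := by rw [hc1]; decide
      rw [if_neg h2, if_pos hc1, pop_reverse]
      rcases (pvStackB cs n).reverse with _ | ⟨a, t⟩ <;> simp
    · by_cases hc2 : cs.getD n ' ' = '{'
      · -- opening brace: counter goes down, stack pushes
        rw [if_neg hc1, if_pos hc2, if_neg hc1, if_pos hc2]
        cases k with
        | zero =>
          rw [if_pos (by norm_num)]
          simp
        | succ j =>
          have hne : ((j + 1 : Nat) : Int) + 1 - 1 ≠ 0 := by push_cast; omega
          rw [if_neg hne]
          have hcast : ((j + 1 : Nat) : Int) + 1 - 1 = ((j : Nat) : Int) + 1 := by push_cast; ring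
          rw [hcast, ih j]
          simp
      · -- other char: nothing changes
        rw [if_neg hc1, if_neg hc2, if_neg hc1, if_neg hc2]
        have hne : ((k : Int) + 1) ≠ 0 := by omega
        rw [if_neg hne]
        exact ih k

-- ===== VERDICT (by name: the statement is the Claim_ definition above) =====
theorem find_json_block_spec : Claim_equal_find_json_block := by
  intro text _
  unfold Spec_find_json_block find_json_block find_json_block_alt
  simp only
  set e := PySem.Str.rfind text "}" with he
  rcases eq_or_ne e (-1) with h | h
  · simp [h]
  · rw [if_neg h, if_neg h]
    rw [show (1 : Int) = ((0 : Nat) : Int) + 1 from rfl, pvLoopA_eq_stack]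
    have hrev : (pvStackB text.toList e.toNat).reverse[0]? = (pvStackB text.toList e.toNat).getLast? := by
      rw [← List.head?_eq_getElem?, List.head?_reverse]
    rcases hS : (pvStackB text.toList e.toNat).getLast? with _ | s
    · simp [hrev, hS]
    · have hs : 0 ≤ s := pvStackB_nonneg _ _ s (List.mem_of_getLast? hS)
      rw [hrev, hS]
      simp only [Option.getD_some]
      rw [if_neg (by omega)]
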